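-- pv_equiv track=rewrite | github.com/B-2U/ISAC | recent_DB/clean.py | keep_last_of_each_value
-- ===== SOURCE A (Python) =====
-- def keep_last_of_each_value(d) -> dict:
--     seen_values = []
--     new_dict = {}
--
--     for key, value in reversed(d.items()):
--         if value not in seen_values:
--             seen_values.append(value)
--             new_dict[key] = value
--
--     new_dict = dict(reversed(new_dict.items()))
--
--     return new_dict
-- ===== SOURCE B (Python) =====
-- def keep_last_of_each_value(d) -> dict:
--     # Single forward pass: evict any earlier entry carrying this value, then append.
--     result = []
--     for key, value in d.items():
--         result = [(k, v) for k, v in result if v != value]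
--         result.append((key, value))
--     return dict(result)
-- ===== Notes on version B (the rewrite author's own statement) =====
-- stated objective: simpler
-- what changed: One forward pass that evicts the earlier entry holding the same value and appends the new one, instead of A's reverse scan with a seen-values list followed by a second reversal.
import Mathlib
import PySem

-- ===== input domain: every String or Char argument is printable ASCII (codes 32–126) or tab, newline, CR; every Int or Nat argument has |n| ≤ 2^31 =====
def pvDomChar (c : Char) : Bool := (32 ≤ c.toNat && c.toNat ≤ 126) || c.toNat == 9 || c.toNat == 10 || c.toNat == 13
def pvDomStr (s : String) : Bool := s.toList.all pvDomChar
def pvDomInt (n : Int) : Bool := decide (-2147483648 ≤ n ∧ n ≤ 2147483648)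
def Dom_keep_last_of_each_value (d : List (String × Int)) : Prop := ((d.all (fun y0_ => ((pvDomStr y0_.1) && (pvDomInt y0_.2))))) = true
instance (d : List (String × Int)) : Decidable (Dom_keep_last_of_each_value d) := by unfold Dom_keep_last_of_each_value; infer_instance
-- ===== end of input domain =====

-- B replaces A's reverse-scan-with-seen-list-then-re-reverse by a single forward pass that
-- evicts the earlier entry holding the same value before appending; objective: simpler.


-- ===== PORT A =====
def keep_last_of_each_value (d : List (String × Int)) : List (String × Int) :=
  -- for key, value in reversed(d.items()): if value not in seen: seen.append(value); new_dict[key]=value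
  let st := d.reverse.foldl
    (fun (st : List Int × PySem.Dict String Int) (p : String × Int) =>
      if p.2 ∈ st.1 then st else (st.1 ++ [p.2], st.2.insert p.1 p.2))
    ([], PySem.Dict.empty)
  -- new_dict = dict(reversed(new_dict.items()))
  (PySem.Dict.ofList st.2.items.reverse).items

-- ===== PORT B =====
def keep_last_of_each_value_alt (d : List (String × Int)) : List (String × Int) :=
  -- result = [(k,v) for (k,v) in result if v != value]; result.append((key,value))
  (PySem.Dict.ofList
    (d.foldl (fun (res : List (String × Int)) (p : String × Int) =>
      res.filter (fun q => !(q.2 == p.2)) ++ [p]) [])).items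

-- ===== PRECONDITION & SPEC =====
-- Pre_ excludes association lists with duplicate keys: those cannot arise from a Python
-- dict argument (A's parameter), so no Python input is excluded.
def Pre_keep_last_of_each_value (d : List (String × Int)) : Prop := (d.map Prod.fst).Nodup
instance (d : List (String × Int)) : Decidable (Pre_keep_last_of_each_value d) := by
  unfold Pre_keep_last_of_each_value; infer_instance
def pvWitness_keep_last_of_each_value : (List (String × Int)) := [("a", 1), ("b", 1), ("c", 2)]
def Spec_keep_last_of_each_value (d : List (String × Int)) (out : List (String × Int)) : Prop := out = keep_last_of_each_value_alt d
instance (d : List (String × Int)) (out : List (String × Int)) : Decidable (Spec_keep_last_of_each_value d out) := by unfold Spec_keep_last_of_each_value; infer_instance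

-- ===== CLAIM (what is proved, stated in full; the proofs are below) =====
def Claim_equal_keep_last_of_each_value : Prop := ∀ (d : List (String × Int)), Dom_keep_last_of_each_value d → Pre_keep_last_of_each_value d → Spec_keep_last_of_each_value d (keep_last_of_each_value d)

-- ===== LEMMAS AND PROOFS =====

-- the common specification: keep each entry whose value does not reappear later
def pvKeep : List (String × Int) → List (String × Int)
  | [] => []
  | p :: rest => if p.2 ∈ rest.map Prod.snd then pvKeep rest else p :: pvKeep rest

-- A's kept entries during the reversed scan, with the seen-values accumulator
def pvG : List Int → List (String × Int) → List (String × Int)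
  | _, [] => []
  | seen, p :: rest => if p.2 ∈ seen then pvG seen rest else p :: pvG (seen ++ [p.2]) rest

theorem pvKeep_sublist (l : List (String × Int)) : List.Sublist (pvKeep l) l := by
  induction l with
  | nil => simp [pvKeep]
  | cons p rest ih =>
    simp only [pvKeep]
    split
    · exact ih.cons _
    · exact ih.cons₂ _

theorem pvG_sublist (seen : List Int) (l : List (String × Int)) : List.Sublist (pvG seen l) l := by
  induction l generalizing seen with
  | nil => simp [pvG]
  | cons p rest ih =>
    simp only [pvG]
    split
    · exact (ih seen).cons _
    · exact (ih _).cons₂ _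

theorem pvG_snoc (xs : List (String × Int)) (p : String × Int) (s : List Int) :
    pvG s (xs ++ [p]) =
      pvG s xs ++ (if p.2 ∈ s ∨ p.2 ∈ xs.map Prod.snd then [] else [p]) := by
  induction xs generalizing s with
  | nil => simp [pvG]
  | cons q rest ih =>
    simp only [List.cons_append, pvG]
    by_cases hq : q.2 ∈ s
    · rw [if_pos hq, if_pos hq, ih s]
      congr 2
      simp only [List.map_cons, List.mem_cons]
      by_cases hv : p.2 = q.2
      · simp [hv, hq]
      · simp [hv]
    · rw [if_neg hq, if_neg hq, ih (s ++ [q.2]), List.cons_append]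
      simp only [List.map_cons, List.mem_append, List.mem_cons,
        List.not_mem_nil, or_false, or_assoc]

theorem pvG_rev (d : List (String × Int)) : (pvG [] d.reverse).reverse = pvKeep d := by
  induction d with
  | nil => rfl
  | cons p rest ih =>
    rw [List.reverse_cons, pvG_snoc, List.reverse_append, ih]
    simp only [pvKeep, List.not_mem_nil, false_or, List.map_reverse, List.mem_reverse]
    split <;> simp

theorem fold_alt (l : List (String × Int)) (acc : List (String × Int)) :
    l.foldl (fun (res : List (String × Int)) (p : String × Int) =>
        res.filter (fun q => !(q.2 == p.2)) ++ [p]) acc =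
      acc.filter (fun q => decide (q.2 ∉ l.map Prod.snd)) ++ pvKeep l := by
  induction l generalizing acc with
  | nil => simp [pvKeep]
  | cons p rest ih =>
    simp only [List.foldl_cons, ih, List.filter_append, List.filter_filter]
    have h1 : (acc.filter (fun q => decide ¬q.2 ∈ List.map Prod.snd rest && !(q.2 == p.2)))
        = acc.filter (fun q => decide (q.2 ∉ List.map Prod.snd (p :: rest))) := by
      apply List.filter_congr
      intro q _
      simp only [List.map_cons, List.mem_cons]
      by_cases h : q.2 = p.2 <;> by_cases h2 : q.2 ∈ List.map Prod.snd rest <;> simp [h, h2]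
    rw [h1, List.append_assoc]
    congr 1
    simp only [pvKeep]
    split
    · next h => simp [List.filter, h]
    · next h => simp [List.filter, h]

theorem fold_a (l : List (String × Int)) (seen : List Int) (nd : PySem.Dict String Int)
    (hnd : (l.map Prod.fst).Nodup) (hfresh : ∀ p ∈ l, nd.contains p.1 = false) :
    (l.foldl
      (fun (st : List Int × PySem.Dict String Int) (p : String × Int) =>
        if p.2 ∈ st.1 then st else (st.1 ++ [p.2], st.2.insert p.1 p.2))
      (seen, nd)).2.items = nd.items ++ pvG seen l := by
  induction l generalizing seen nd with
  | nil => simp [pvG]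
  | cons p rest ih =>
    rw [List.map_cons, List.nodup_cons] at hnd
    have hf1 : nd.contains p.1 = false := hfresh p List.mem_cons_self
    have hf2 : ∀ q ∈ rest, nd.contains q.1 = false :=
      fun q hq => hfresh q (List.mem_cons_of_mem _ hq)
    simp only [List.foldl_cons, pvG]
    by_cases hp : p.2 ∈ seen
    · rw [if_pos hp, if_pos hp]
      exact ih seen nd hnd.2 hf2
    · rw [if_neg hp, if_neg hp]
      have hfr : ∀ q ∈ rest, (nd.insert p.1 p.2).contains q.1 = false := by
        intro q hq
        rw [PySem.Dict.contains_insert]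
        have hne : q.1 ≠ p.1 := fun h => hnd.1 (h ▸ List.mem_map_of_mem hq)
        simp [hne, hf2 q hq]
      rw [ih _ _ hnd.2 hfr,
        PySem.Dict.items_insert_of_not_contains _ _ hf1,
        List.append_assoc]
      simp

theorem ofList_items (xs : List (String × Int)) (h : (xs.map Prod.fst).Nodup) :
    (PySem.Dict.ofList xs).items = xs := by
  have := PySem.Dict.items_foldl_insert_fresh xs Prod.fst Prod.snd PySem.Dict.empty
    (fun a _ => PySem.Dict.contains_empty _) h
  simpa [PySem.Dict.ofList, PySem.Dict.update] using this

theorem nodup_keys_of_sublist {l m : List (String × Int)} (hs : List.Sublist l m)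
    (h : (m.map Prod.fst).Nodup) : (l.map Prod.fst).Nodup :=
  (hs.map Prod.fst).nodup h

-- ===== VERDICT (by name: the statement is the Claim_ definition above) =====
theorem keep_last_of_each_value_spec : Claim_equal_keep_last_of_each_value := by
  intro d _ hpre
  unfold Spec_keep_last_of_each_value keep_last_of_each_value keep_last_of_each_value_alt
  have hrevnd : (d.reverse.map Prod.fst).Nodup := by
    rw [List.map_reverse]; exact List.nodup_reverse.mpr hpre
  have hA := fold_a d.reverse [] PySem.Dict.empty hrevnd
    (fun p _ => PySem.Dict.contains_empty _)
  simp only [PySem.Dict.empty] at hA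
  simp only [PySem.Dict.empty, hA, List.nil_append]
  have hGnd : ((pvG [] d.reverse).reverse.map Prod.fst).Nodup := by
    apply nodup_keys_of_sublist ((pvG_sublist [] d.reverse).reverse)
    simpa using hpre
  have hKnd : ((pvKeep d).map Prod.fst).Nodup :=
    nodup_keys_of_sublist (pvKeep_sublist d) hpre
  rw [ofList_items _ hGnd, pvG_rev, fold_alt]
  simp [ofList_items _ hKnd]
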